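-- pv_equiv track=rewrite | github.com/jinfengw03/SkyBridge | tools/nuscenes_export/export_to_nuscenes.py | map_category_name
-- ===== SOURCE A (Python) =====
-- from typing import Dict, List, Tuple, Optional
--
-- def map_category_name(tname: str, cmap: Dict) -> Optional[str]:
--     """
--     Map source category/type string to a valid nuScenes category_name that the SDK
--     can map into its 10-class detection taxonomy via category_to_detection_name.
--
--     Returns None if unmappable, in which case the caller should drop the box.
--     """
--     t = (tname or "").lower()
--
--     # 1) Explicit user-provided mappings (substring match)
--     try:
--         direct_map: Dict[str, str] = cmap.get('mapping', {})
--         for patt, target in direct_map.items():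
--             if patt and patt.lower() in t:
--                 return target
--     except Exception:
--         pass
--
--     # Common vehicle classes
--     if "trailer" in t:
--         return "vehicle.trailer"
--     if any(k in t for k in ("cons", "construction")):
--         return "vehicle.construction"
--     if "truck" in t:
--         return "vehicle.truck"
--     if "bus" in t:
--         return "vehicle.bus"
--     # Motorcycle first to avoid matching 'bike' from 'motorbike'
--     if any(k in t for k in ("motorcycle", "motorbike", "mcycle", "scooter")):
--         return "vehicle.motorcycle"
--     # Bicycle next (avoid false positives from 'motorbike' handled above)
--     if any(k in t for k in ("bicycle", "bike", "cycle")):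
--         return "vehicle.bicycle"
--     if any(k in t for k in ("car", "sedan", "vehicle")):
--         return "vehicle.car"
--
--     # Pedestrians
--     if any(k in t for k in ("ped", "person", "walker", "human")):
--         # Use the generic adult subcategory
--         return "human.pedestrian.adult"
--
--     # Movable objects
--     if "cone" in t:
--         return "movable_object.trafficcone"
--     if "barrier" in t:
--         return "movable_object.barrier"
--
--     # Unmappable
--     return None
-- ===== SOURCE B (Python) =====
-- from typing import Dict, Optional
--
-- _RULES = [
--     (("trailer",), "vehicle.trailer"),
--     (("cons", "construction"), "vehicle.construction"),
--     (("truck",), "vehicle.truck"),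
--     (("bus",), "vehicle.bus"),
--     (("motorcycle", "motorbike", "mcycle", "scooter"), "vehicle.motorcycle"),
--     (("bicycle", "bike", "cycle"), "vehicle.bicycle"),
--     (("car", "sedan", "vehicle"), "vehicle.car"),
--     (("ped", "person", "walker", "human"), "human.pedestrian.adult"),
--     (("cone",), "movable_object.trafficcone"),
--     (("barrier",), "movable_object.barrier"),
-- ]
--
-- # Inverted index: keyword -> (rule priority, target).  All 21 keywords are distinct,
-- # so flattening loses nothing; the rule a keyword belongs to is recovered by priority.
-- _KEYWORD_INDEX = {kw: (prio, target)
--                   for prio, (kws, target) in enumerate(_RULES)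
--                   for kw in kws}
--
-- def map_category_name(tname: str, cmap: Dict) -> Optional[str]:
--     t = (tname or "").lower()
--
--     # 1) Explicit user-provided mappings: first substring hit.
--     try:
--         hit = next((target for patt, target in cmap.get('mapping', {}).items()
--                     if patt and patt.lower() in t), None)
--     except Exception:
--         hit = None
--     if hit is not None:
--         return hit
--
--     # 2) Built-in taxonomy: collect every keyword occurring in t and keep the one
--     #    from the highest-priority (lowest index) rule.  Equivalent to the original
--     #    ordered if-chain because a rule fires iff one of its keywords occurs.
--     best = min((pt for kw, pt in _KEYWORD_INDEX.items() if kw in t), default=None)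
--     return best[1] if best is not None else None
-- ===== Notes on version B (the rewrite author's own statement) =====
-- stated objective: alternative
-- what changed: Instead of testing the ten rules in priority order and returning at the first hit, B flattens the rules into an inverted keyword->(priority,target) index built once, collects ALL keywords occurring in the string, and selects the match of minimum priority; the user-mapping phase is re-expressed as a single next() over a generator.
import Mathlib
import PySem

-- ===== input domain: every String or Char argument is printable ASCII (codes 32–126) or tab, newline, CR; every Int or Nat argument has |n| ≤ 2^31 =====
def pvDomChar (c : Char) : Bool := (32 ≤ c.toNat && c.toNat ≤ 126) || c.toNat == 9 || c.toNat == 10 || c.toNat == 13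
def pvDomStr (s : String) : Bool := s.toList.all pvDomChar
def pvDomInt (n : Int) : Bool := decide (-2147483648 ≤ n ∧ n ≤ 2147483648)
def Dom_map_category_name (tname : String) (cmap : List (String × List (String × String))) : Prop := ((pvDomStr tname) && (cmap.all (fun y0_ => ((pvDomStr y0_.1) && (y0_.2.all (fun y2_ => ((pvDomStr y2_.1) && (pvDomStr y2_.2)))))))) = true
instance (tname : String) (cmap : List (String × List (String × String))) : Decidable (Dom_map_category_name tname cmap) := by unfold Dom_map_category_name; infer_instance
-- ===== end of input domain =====

-- B replaces the ordered if-chain (first rule that fires wins) by an inverted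
-- keyword -> (priority, target) index: it collects ALL keywords occurring in the
-- string and keeps the minimum-priority match; the user phase becomes a first-match
-- search (next over a generator). Return-value equivalence on all inputs.

-- ===== PORT A =====
-- the user-mapping loop: first pattern whose lowercase form is a substring of t wins
def pvUserLoopA (t : String) : List (String × String) → Option String
  | [] => none
  | (patt, target) :: rest =>
    if patt != "" && PySem.Str.isIn (PySem.Str.lower patt) t then some target
    else pvUserLoopA t rest

-- the built-in if-chain after the user mapping phase
def pvFallbackA (t : String) : Option String :=
  if PySem.Str.isIn "trailer" t then some "vehicle.trailer"
  else if PySem.Str.isIn "cons" t || PySem.Str.isIn "construction" t then some "vehicle.construction"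
  else if PySem.Str.isIn "truck" t then some "vehicle.truck"
  else if PySem.Str.isIn "bus" t then some "vehicle.bus"
  else if PySem.Str.isIn "motorcycle" t || PySem.Str.isIn "motorbike" t || PySem.Str.isIn "mcycle" t || PySem.Str.isIn "scooter" t then some "vehicle.motorcycle"
  else if PySem.Str.isIn "bicycle" t || PySem.Str.isIn "bike" t || PySem.Str.isIn "cycle" t then some "vehicle.bicycle"
  else if PySem.Str.isIn "car" t || PySem.Str.isIn "sedan" t || PySem.Str.isIn "vehicle" t then some "vehicle.car"
  else if PySem.Str.isIn "ped" t || PySem.Str.isIn "person" t || PySem.Str.isIn "walker" t || PySem.Str.isIn "human" t then some "human.pedestrian.adult"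
  else if PySem.Str.isIn "cone" t then some "movable_object.trafficcone"
  else if PySem.Str.isIn "barrier" t then some "movable_object.barrier"
  else none

def map_category_name (tname : String) (cmap : List (String × List (String × String))) : Option String :=
  let t := PySem.Str.lower (if tname == "" then "" else tname)   -- (tname or "").lower()
  let direct_map := (PySem.Dict.mk cmap).getD "mapping" []       -- cmap.get('mapping', {})
  match pvUserLoopA t direct_map with
  | some r => some r
  | none => pvFallbackA t

-- ===== PORT B =====
def pvRulesB : List (List String × String) :=
  [ (["trailer"], "vehicle.trailer"),
    (["cons", "construction"], "vehicle.construction"),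
    (["truck"], "vehicle.truck"),
    (["bus"], "vehicle.bus"),
    (["motorcycle", "motorbike", "mcycle", "scooter"], "vehicle.motorcycle"),
    (["bicycle", "bike", "cycle"], "vehicle.bicycle"),
    (["car", "sedan", "vehicle"], "vehicle.car"),
    (["ped", "person", "walker", "human"], "human.pedestrian.adult"),
    (["cone"], "movable_object.trafficcone"),
    (["barrier"], "movable_object.barrier") ]

-- _KEYWORD_INDEX: flattening comprehension; all 21 keywords are distinct, so the
-- dict is exactly this association list (no overwriting occurs).
def pvKeywordIndex : List (String × Int × String) :=
  (PySem.List.enumerate pvRulesB 0).flatMap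
    (fun pr => pr.2.1.map (fun kw => (kw, pr.1, pr.2.2)))

-- python min over (priority, target) tuples.  Exact port: Python's min compares the
-- tuples lexicographically and keeps the first minimum; here equal priorities always
-- carry equal targets (both come from the same rule), so comparing priorities alone
-- computes the same tuple.
def pvMinBy : List (Int × String) → Option (Int × String)
  | [] => none
  | x :: xs => some (xs.foldl (fun b y => if y.1 < b.1 then y else b) x)

def map_category_name_alt (tname : String) (cmap : List (String × List (String × String))) : Option String :=
  let t := PySem.Str.lower (if tname == "" then "" else tname)
  let direct_map := (PySem.Dict.mk cmap).getD "mapping" []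
  -- next((target for patt, target in ... if patt and patt.lower() in t), None)
  let hit := (direct_map.find? (fun p => p.1 != "" && PySem.Str.isIn (PySem.Str.lower p.1) t)).map (·.2)
  match hit with
  | some r => some r
  | none =>
    -- best = min((pt for kw, pt in _KEYWORD_INDEX.items() if kw in t), default=None)
    let best := pvMinBy ((pvKeywordIndex.filter (fun e => PySem.Str.isIn e.1 t)).map (·.2))
    match best with
    | some b => some b.2
    | none => none

-- ===== PRECONDITION & SPEC =====
def Spec_map_category_name (tname : String) (cmap : List (String × List (String × String))) (out : Option String) : Prop := out = map_category_name_alt tname cmap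
instance (tname : String) (cmap : List (String × List (String × String))) (out : Option String) : Decidable (Spec_map_category_name tname cmap out) := by unfold Spec_map_category_name; infer_instance

-- ===== CLAIM =====
def Claim_equal_map_category_name : Prop := ∀ (tname : String) (cmap : List (String × List (String × String))), Dom_map_category_name tname cmap → Spec_map_category_name tname cmap (map_category_name tname cmap)

-- ===== LEMMAS AND PROOFS =====

-- A's user loop is first-match search
theorem pvUserLoop_eq_find (t : String) (l : List (String × String)) :
    pvUserLoopA t l
      = (l.find? (fun p => p.1 != "" && PySem.Str.isIn (PySem.Str.lower p.1) t)).map (·.2) := by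
  induction l with
  | nil => rfl
  | cons p rest ih =>
    obtain ⟨patt, target⟩ := p
    cases h : (patt != "" && PySem.Str.isIn (PySem.Str.lower patt) t) with
    | true =>
      rw [List.find?_cons_of_pos (p := fun (p : String × String) => p.1 != "" && PySem.Str.isIn (PySem.Str.lower p.1) t) h]
      simp only [pvUserLoopA, h, if_true, Option.map_some]
    | false =>
      rw [List.find?_cons_of_neg (p := fun (p : String × String) => p.1 != "" && PySem.Str.isIn (PySem.Str.lower p.1) t) (by simp only [Bool.not_eq_true]; exact h)]
      simp only [pvUserLoopA, h, Bool.false_eq_true, if_false, ih]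

-- proof-side: ordered first-hit scan over a rule list (what A's if-chain computes)
def pvScan (t : String) : List (List String × String) → Option String
  | [] => none
  | (kws, tg) :: rest =>
    if kws.any (fun k => PySem.Str.isIn k t) then some tg else pvScan t rest

-- proof-side: flatten with explicit starting priority
def pvFlat (t : String) : Int → List (List String × String) → List (Int × String)
  | _, [] => []
  | i, (kws, tg) :: rest =>
      (kws.filter (fun k => PySem.Str.isIn k t)).map (fun _ => (i, tg)) ++ pvFlat t (i + 1) rest

theorem pvFlat_block (t : String) (i : Int) (tg : String) (ks : List String) :
    ((ks.map (fun kw => (kw, i, tg))).filter (fun e => PySem.Str.isIn e.1 t)).map (fun x => x.2)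
      = (ks.filter (fun k => PySem.Str.isIn k t)).map (fun _ => (i, tg)) := by
  induction ks with
  | nil => rfl
  | cons k ks ihk =>
    simp only [List.map_cons, List.filter_cons]
    cases hk : PySem.Str.isIn k t with
    | true => simp only [if_true, List.map_cons, ihk]
    | false => simp only [Bool.false_eq_true, if_false, ihk]

theorem pvFlat_filter_map (t : String) (i : Int) (rs : List (List String × String)) :
    ((PySem.List.enumerate rs i).flatMap
        (fun pr => pr.2.1.map (fun kw => (kw, pr.1, pr.2.2)))
      |>.filter (fun e => PySem.Str.isIn e.1 t)).map (fun x => x.2) = pvFlat t i rs := by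
  induction rs generalizing i with
  | nil => simp [pvFlat, PySem.List.enumerate_nil]
  | cons r rest ih =>
    obtain ⟨kws, tg⟩ := r
    simp only [PySem.List.enumerate_cons, List.flatMap_cons, List.filter_append,
      List.map_append, pvFlat, ih]
    congr 1
    exact pvFlat_block t i tg kws

-- every priority in pvFlat t i rs is ≥ i
theorem pvFlat_ge (t : String) (i : Int) (rs : List (List String × String)) :
    ∀ e ∈ pvFlat t i rs, i ≤ e.1 := by
  induction rs generalizing i with
  | nil => simp [pvFlat]
  | cons r rest ih =>
    obtain ⟨kws, tg⟩ := r
    intro e he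
    simp only [pvFlat, List.mem_append, List.mem_map] at he
    rcases he with ⟨_, _, rfl⟩ | h
    · exact le_refl i
    · have := ih (i + 1) e h; omega

-- the min-fold keeps its seed when everything later has ≥ priority
theorem pvMinBy_head (x : Int × String) (xs : List (Int × String))
    (h : ∀ y ∈ xs, x.1 ≤ y.1) :
    pvMinBy (x :: xs) = some x := by
  simp only [pvMinBy, Option.some.injEq]
  induction xs generalizing x with
  | nil => rfl
  | cons y ys ih =>
    have hy : ¬ y.1 < x.1 := not_lt.mpr (h y (List.mem_cons_self))
    simp only [List.foldl_cons, if_neg hy]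
    exact ih x (fun z hz => h z (List.mem_cons_of_mem _ hz))

-- first-hit scan = min-priority selection over the flattened matches
theorem pvScan_eq_min (t : String) (i : Int) (rs : List (List String × String)) :
    pvScan t rs = (pvMinBy (pvFlat t i rs)).map (fun x => x.2) := by
  induction rs generalizing i with
  | nil => rfl
  | cons r rest ih =>
    obtain ⟨kws, tg⟩ := r
    by_cases h : (kws.any (fun k => PySem.Str.isIn k t)) = true
    · -- this rule fires: its flattened block is nonempty with priority i, min is its head
      obtain ⟨k, hk, hkt⟩ := List.any_eq_true.mp h
      have hmem : k ∈ kws.filter (fun k => PySem.Str.isIn k t) := by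
        rw [List.mem_filter]; exact ⟨hk, hkt⟩
      have hne : (kws.filter (fun k => PySem.Str.isIn k t)) ≠ [] := by
        intro hnil; rw [hnil] at hmem; exact List.not_mem_nil hmem
      obtain ⟨k0, ks0, hks⟩ := List.exists_cons_of_ne_nil hne
      simp only [pvScan, if_pos h, pvFlat, hks, List.map_cons, List.cons_append]
      rw [pvMinBy_head]
      · rfl
      · intro y hy
        simp only [List.mem_append, List.mem_map] at hy
        rcases hy with ⟨_, _, rfl⟩ | hy
        · exact le_refl i
        · have := pvFlat_ge t (i + 1) rest y hy; omega
    · have h' : ∀ k ∈ kws, PySem.Str.isIn k t = false := by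
        intro k hk
        cases hkt : PySem.Str.isIn k t with
        | false => rfl
        | true => exact absurd (List.any_eq_true.mpr ⟨k, hk, hkt⟩) h
      have hfil : kws.filter (fun k => PySem.Str.isIn k t) = [] := by
        rw [List.filter_eq_nil_iff]
        intro k hk
        simpa using h' k hk
      simp only [pvScan, if_neg h, pvFlat, hfil, List.map_nil, List.nil_append]
      exact ih (i + 1)

-- A's if-chain is the ordered scan of the rule table
theorem pvFallback_eq_scan (t : String) : pvFallbackA t = pvScan t pvRulesB := by
  simp only [pvFallbackA, pvScan, pvRulesB, List.any_cons, List.any_nil, Bool.or_false,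
    Bool.or_assoc]

-- ===== VERDICT =====
theorem map_category_name_spec : Claim_equal_map_category_name := by
  intro tname cmap _
  unfold Spec_map_category_name map_category_name map_category_name_alt
  simp only [pvKeywordIndex]
  rw [pvUserLoop_eq_find]
  set t := PySem.Str.lower (if tname == "" then "" else tname)
  cases hfind : ((PySem.Dict.mk cmap).getD "mapping" []).find?
      (fun p => p.1 != "" && PySem.Str.isIn (PySem.Str.lower p.1) t) with
  | some p => rfl
  | none =>
    simp only [Option.map_none]
    rw [pvFallback_eq_scan, pvScan_eq_min t 0, ← pvFlat_filter_map]
    generalize pvMinBy (((PySem.List.enumerate pvRulesB 0).flatMap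
        (fun pr => pr.2.1.map (fun kw => (kw, pr.1, pr.2.2)))
      |>.filter (fun e => PySem.Str.isIn e.1 t)).map (fun x => x.2)) = o
    cases o with
    | none => rfl
    | some b => rfl
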